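-- pv_equiv track=rewrite | github.com/AJarombek/morning-programs | 2021/12/29/prefix_string.py | is_prefix_string_faster
-- ===== SOURCE A (Python) =====
-- from typing import List
--
-- def is_prefix_string_faster(s: str, words: List[str]) -> bool:
--     index = 0
--
--     for word in words:
--         if word != s[index:index + len(word)]:
--             return False
--
--         index += len(word)
--
--         if index == len(s):
--             return True
--         elif index > len(s):
--             return False
--
--     return False
-- ===== SOURCE B (Python) =====
-- from typing import List
--
-- def is_prefix_string_faster(s: str, words: List[str]) -> bool:
--     prefix = ""
--     for word in words:
--         prefix += word
--         if prefix == s: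
--             return True
--         if len(prefix) > len(s):
--             return False
--     return False
-- ===== Notes on version B (the rewrite author's own statement) =====
-- stated objective: simpler
-- what changed: B drops A's running index and per-word slice comparison of s, instead building the concatenation of the words and comparing it to s by value (with a length cutoff), which removes the early-mismatch branch.
import Mathlib
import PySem

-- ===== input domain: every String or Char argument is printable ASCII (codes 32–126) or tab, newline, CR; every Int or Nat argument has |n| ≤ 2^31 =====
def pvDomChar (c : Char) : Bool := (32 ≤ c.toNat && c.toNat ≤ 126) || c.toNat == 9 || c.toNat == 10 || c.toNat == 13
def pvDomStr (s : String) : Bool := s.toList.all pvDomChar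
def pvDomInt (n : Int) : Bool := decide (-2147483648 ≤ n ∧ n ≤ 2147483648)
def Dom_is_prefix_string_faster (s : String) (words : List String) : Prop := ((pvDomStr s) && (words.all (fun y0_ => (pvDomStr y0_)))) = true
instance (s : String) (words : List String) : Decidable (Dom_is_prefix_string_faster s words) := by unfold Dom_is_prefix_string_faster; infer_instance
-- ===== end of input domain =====

-- B replaces A's running index and per-word slice comparison by building the concatenation
-- of the words and comparing it to s by value (objective: simpler).

-- ===== PORT A =====
-- the for-loop of A, with its state: the running index into s
def pvALoop (s : List Char) (index : Int) (ws : List String) : Bool :=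
  match ws with
  | [] => false
  | w :: ws =>
    -- if word != s[index:index + len(word)]: return False
    if w.toList ≠ PySem.List.slice s (some index) (some (index + (w.toList.length : Int))) then false
    else
      -- index += len(word)
      let index' := index + (w.toList.length : Int)
      if index' = (s.length : Int) then true          -- if index == len(s): return True
      else if (s.length : Int) < index' then false    -- elif index > len(s): return False
      else pvALoop s index' ws

def is_prefix_string_faster (s : String) (words : List String) : Bool :=
  pvALoop s.toList 0 words

-- ===== PORT B =====
-- the for-loop of B, with its state: the accumulated prefix string
def pvBLoop (s : List Char) (pre : List Char) (ws : List String) : Bool :=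
  match ws with
  | [] => false
  | w :: ws =>
    let pre' := pre ++ w.toList          -- prefix += word
    if pre' = s then true                -- if prefix == s: return True
    else if s.length < pre'.length then false  -- if len(prefix) > len(s): return False
    else pvBLoop s pre' ws

def is_prefix_string_faster_alt (s : String) (words : List String) : Bool :=
  pvBLoop s.toList [] words

-- ===== PRECONDITION & SPEC =====
def Spec_is_prefix_string_faster (s : String) (words : List String) (out : Bool) : Prop := out = is_prefix_string_faster_alt s words
instance (s : String) (words : List String) (out : Bool) : Decidable (Spec_is_prefix_string_faster s words out) := by unfold Spec_is_prefix_string_faster; infer_instance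

-- ===== CLAIM (what is proved, stated in full; the proofs are below) =====
def Claim_equal_is_prefix_string_faster : Prop := ∀ (s : String) (words : List String), Dom_is_prefix_string_faster s words → Spec_is_prefix_string_faster s words (is_prefix_string_faster s words)

-- ===== LEMMAS AND PROOFS =====

-- once the accumulated prefix fails to be a prefix of s, B's loop can only return false
lemma pvBLoop_not_prefix (s : List Char) (ws : List String) :
    ∀ pre : List Char, ¬ pre <+: s → pvBLoop s pre ws = false := by
  induction ws with
  | nil => intro pre _; rfl
  | cons w ws ih =>
    intro pre h
    have hnp : ¬ (pre ++ w.toList) <+: s := fun hp => h ((List.prefix_append pre w.toList).trans hp)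
    simp only [pvBLoop]
    rw [if_neg (fun he => hnp (by rw [he]))]
    split
    · rfl
    · exact ih _ hnp

-- the loop invariant: A at index i corresponds to B holding the prefix s.take i
lemma pvLoop_eq (s : List Char) (ws : List String) :
    ∀ i : Nat, i ≤ s.length → pvALoop s (i : Int) ws = pvBLoop s (s.take i) ws := by
  induction ws with
  | nil => intro i _; rfl
  | cons w ws ih =>
    intro i hi
    have hsl : PySem.List.slice s (some (i : Int)) (some ((i : Int) + (w.toList.length : Int)))
        = (s.drop i).take w.toList.length := by
      exact_mod_cast PySem.List.slice_natCast_add s i w.toList.length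
    by_cases hm : w.toList = (s.drop i).take w.toList.length
    · -- word matches the slice
      have hlen : i + w.toList.length ≤ s.length := by
        have := congrArg List.length hm
        simp only [List.length_take, List.length_drop] at this
        omega
      have htake : s.take i ++ w.toList = s.take (i + w.toList.length) := by
        rw [List.take_add]
        exact congrArg (s.take i ++ ·) hm
      simp only [pvALoop, pvBLoop, hsl]
      rw [if_neg (by simpa using hm)]
      by_cases hend : i + w.toList.length = s.length
      · have hA : ((i : Int) + (w.toList.length : Int)) = (s.length : Int) := by exact_mod_cast hend
        rw [if_pos hA, htake, hend, List.take_length, if_pos rfl]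
      · have hlt : i + w.toList.length < s.length := by omega
        have hA : ¬ ((i : Int) + (w.toList.length : Int)) = (s.length : Int) := by
          intro h; exact hend (by exact_mod_cast h)
        have hA2 : ¬ ((s.length : Int) < (i : Int) + (w.toList.length : Int)) := by
          omega
        rw [if_neg hA, if_neg hA2, htake]
        have hne : ¬ s.take (i + w.toList.length) = s := by
          intro h
          have := congrArg List.length h
          simp only [List.length_take] at this
          omega
        rw [if_neg hne]
        have hle2 : ¬ s.length < (s.take (i + w.toList.length)).length := by
          simp only [List.length_take]; omega
        rw [if_neg hle2]
        have : ((i : Int) + (w.toList.length : Int)) = ((i + w.toList.length : Nat) : Int) := by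
          push_cast; ring
        rw [this, ih (i + w.toList.length) (le_of_lt hlt)]
    · -- word mismatches the slice: A returns false now, B can never succeed
      have hnp : ¬ (s.take i ++ w.toList) <+: s := by
        intro hp
        have hsplit : s.take i ++ s.drop i = s := List.take_append_drop i s
        have hp' : s.take i ++ w.toList <+: s.take i ++ s.drop i := by rwa [hsplit]
        have hw : w.toList <+: s.drop i := (List.prefix_append_right_inj (s.take i)).mp hp'
        exact hm (List.prefix_iff_eq_take.mp hw)
      simp only [pvALoop]
      rw [if_pos (show w.toList ≠ _ by rw [hsl]; exact hm)]
      have hb : pvBLoop s (s.take i) (w :: ws) = false := by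
        simp only [pvBLoop]
        rw [if_neg (fun he => hnp (by rw [he]))]
        split
        · rfl
        · exact pvBLoop_not_prefix s ws _ hnp
      exact hb.symm

-- ===== VERDICT (by name: the statement is the Claim_ definition above) =====
theorem is_prefix_string_faster_spec : Claim_equal_is_prefix_string_faster := by
  intro s words _
  unfold Spec_is_prefix_string_faster is_prefix_string_faster is_prefix_string_faster_alt
  have := pvLoop_eq s.toList words 0 (Nat.zero_le _)
  simpa using this
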